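-- pv_equiv track=rewrite | github.com/jlpxmoldco/the-mold-report | generate_newsletter.py | by_category
-- ===== SOURCE A (Python) =====
-- CATEGORY_LABELS = {
--     "research": "Research",
--     "regulation": "Regulation",
--     "news": "News",
--     "industry": "Industry",
--     "diagnostics": "Diagnostics",
-- }
--
-- def by_category(articles, exclude_ids=None):
--     exclude = exclude_ids or set()
--     out = {k: [] for k in CATEGORY_LABELS}
--     for a in articles:
--         if a["id"] in exclude:
--             continue
--         cat = a.get("category", "news")
--         if cat not in out:
--             cat = "news"
--         out[cat].append(a)
--     return out
-- ===== SOURCE B (Python) =====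
-- CATEGORY_LABELS = {
--     "research": "Research",
--     "regulation": "Regulation",
--     "news": "News",
--     "industry": "Industry",
--     "diagnostics": "Diagnostics",
-- }
--
-- def _resolve(a):
--     cat = a.get("category", "news")
--     return cat if cat in CATEGORY_LABELS else "news"
--
-- def by_category(articles, exclude_ids=None):
--     excluded = set(exclude_ids or ())
--     return {k: [a for a in articles
--                 if a["id"] not in excluded and _resolve(a) == k]
--             for k in CATEGORY_LABELS}
-- ===== Notes on version B (the rewrite author's own statement) =====
-- stated objective: idiomatic
-- what changed: B replaces A's single-pass mutable-dict bucketing (dispatch each article into its bucket) with a dict comprehension over the category keys, each bucket a list-comprehension filter of the articles by resolved category; a helper resolves the effective category against CATEGORY_LABELS instead of the evolving output dict.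
import Mathlib
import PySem

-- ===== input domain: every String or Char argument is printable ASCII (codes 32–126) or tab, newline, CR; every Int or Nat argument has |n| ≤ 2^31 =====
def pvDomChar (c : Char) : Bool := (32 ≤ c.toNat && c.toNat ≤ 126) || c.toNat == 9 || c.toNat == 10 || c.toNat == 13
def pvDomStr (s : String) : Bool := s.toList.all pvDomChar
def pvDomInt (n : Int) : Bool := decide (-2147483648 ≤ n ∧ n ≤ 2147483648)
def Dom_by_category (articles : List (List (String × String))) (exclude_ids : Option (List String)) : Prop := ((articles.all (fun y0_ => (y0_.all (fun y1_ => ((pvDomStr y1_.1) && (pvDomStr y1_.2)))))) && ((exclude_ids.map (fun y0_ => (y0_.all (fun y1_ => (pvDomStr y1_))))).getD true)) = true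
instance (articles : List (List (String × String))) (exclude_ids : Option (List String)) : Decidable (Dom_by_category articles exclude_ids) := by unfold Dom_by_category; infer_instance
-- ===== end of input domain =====

-- B rebuilds the grouping as one filter of the articles per category key (resolved against the
-- fixed CATEGORY_LABELS) instead of A's single-pass dispatch into a mutable dict; same return value.

-- ===== PORT A =====

def pvCatKeys : List String := ["research", "regulation", "news", "industry", "diagnostics"]

-- a[k] / a.get(k): first match in the association list (none = KeyError for a[k])
def pyLookup (a : List (String × String)) (k : String) : Option String :=
  (a.find? (fun kv => kv.1 == k)).map (·.2)

-- body of A's for-loop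
def stepA (exclude : List String) (d : PySem.Dict String (List (List (String × String))))
    (a : List (String × String)) : PySem.Dict String (List (List (String × String))) :=
  match pyLookup a "id" with
  | none => d   -- Python raises KeyError here; excluded by Pre_
  | some i =>
    if exclude.contains i then d
    else
      let cat := (pyLookup a "category").getD "news"
      let cat := if d.contains cat then cat else "news"
      d.modify cat [] (fun l => l ++ [a])

def by_category (articles : List (List (String × String))) (exclude_ids : Option (List String)) : List (String × List (List (String × String))) :=
  let exclude : List String := exclude_ids.getD []
  let out : PySem.Dict String (List (List (String × String))) :=
    pvCatKeys.foldl (fun d k => d.insert k []) PySem.Dict.empty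
  (articles.foldl (stepA exclude) out).items

-- ===== PORT B =====
def resolveCat (a : List (String × String)) : String :=
  let cat := (pyLookup a "category").getD "news"
  if pvCatKeys.contains cat then cat else "news"

def by_category_alt (articles : List (List (String × String))) (exclude_ids : Option (List String)) : List (String × List (List (String × String))) :=
  let excluded : PySem.Set String := PySem.Set.ofList (exclude_ids.getD [])
  pvCatKeys.map (fun k => (k,
    articles.filter (fun a =>
      !(PySem.Set.contains excluded ((pyLookup a "id").getD "")) && resolveCat a == k)))


-- ===== PRECONDITION & SPEC =====
-- Pre_ excludes articles without an "id" key, on which Python's a["id"] raises KeyError.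
def Pre_by_category (articles : List (List (String × String))) (exclude_ids : Option (List String)) : Prop :=
  articles.all (fun a => a.any (fun kv => kv.1 == "id")) = true
instance (articles : List (List (String × String))) (exclude_ids : Option (List String)) : Decidable (Pre_by_category articles exclude_ids) := by unfold Pre_by_category; infer_instance

def pvWitness_by_category : (List (List (String × String))) × Option (List String) :=
  ([[("id", "1")], [("id", "2"), ("category", "industry")], [("id", "3"), ("category", "x")]], some ["2"])

def Spec_by_category (articles : List (List (String × String))) (exclude_ids : Option (List String)) (out : List (String × List (List (String × String)))) : Prop := out = by_category_alt articles exclude_ids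
instance (articles : List (List (String × String))) (exclude_ids : Option (List String)) (out : List (String × List (List (String × String)))) : Decidable (Spec_by_category articles exclude_ids out) := by unfold Spec_by_category; infer_instance

-- ===== CLAIM (what is proved, stated in full; the proofs are below) =====
def Claim_equal_by_category : Prop := ∀ (articles : List (List (String × String))) (exclude_ids : Option (List String)), Dom_by_category articles exclude_ids → Pre_by_category articles exclude_ids → Spec_by_category articles exclude_ids (by_category articles exclude_ids)

-- ===== LEMMAS AND PROOFS =====

lemma resolveCat_mem (a : List (String × String)) : pvCatKeys.contains (resolveCat a) = true := by
  unfold resolveCat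
  dsimp only
  split
  · assumption
  · decide

lemma ofList_contains (l : List String) (x : String) :
    PySem.Set.contains (PySem.Set.ofList l) x = l.contains x := by
  by_cases hx : x ∈ l <;>
    simp [PySem.Set.contains_eq_listContains, PySem.Set.mem_ofList, hx]

lemma stepA_excluded (exclude : List String) (d : PySem.Dict String (List (List (String × String))))
    (a : List (String × String)) (i : String) (hi : pyLookup a "id" = some i)
    (hex : exclude.contains i = true) : stepA exclude d a = d := by
  have hexm : i ∈ exclude := by simpa using hex
  simp [stepA, hi, hexm]

lemma stepA_kept (exclude : List String) (d : PySem.Dict String (List (List (String × String))))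
    (a : List (String × String)) (i : String) (hi : pyLookup a "id" = some i)
    (hex : exclude.contains i = false)
    (hk : ∀ c, d.contains c = pvCatKeys.contains c) :
    stepA exclude d a = d.modify (resolveCat a) [] (fun l => l ++ [a]) := by
  have hexm : i ∉ exclude := by simpa using hex
  simp [stepA, resolveCat, hi, hexm, hk]

lemma contains_step (d : PySem.Dict String (List (List (String × String))))
    (a : List (String × String)) (hk : ∀ c, d.contains c = pvCatKeys.contains c) (c : String) :
    (d.modify (resolveCat a) [] (fun l => l ++ [a])).contains c = pvCatKeys.contains c := by
  rw [PySem.Dict.contains_modify, hk]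
  have hm : resolveCat a ∈ pvCatKeys := by simpa using resolveCat_mem a
  by_cases hc : c = resolveCat a
  · subst hc; simp [hm]
  · simp [hc]

lemma foldA_eq (exclude : List String) :
    ∀ (arts : List (List (String × String))) (d : PySem.Dict String (List (List (String × String)))),
    (∀ a ∈ arts, (pyLookup a "id").isSome) →
    (∀ c, d.contains c = pvCatKeys.contains c) →
    arts.foldl (stepA exclude) d
    = ((arts.filter (fun a => !(exclude.contains ((pyLookup a "id").getD "")))).map
        (fun a => (resolveCat a, a))).foldl (fun d p => d.modify p.1 [] (fun l => l ++ [p.2])) d := by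
  intro arts
  induction arts with
  | nil => intro d _ _; rfl
  | cons a rest ih =>
    intro d hpre hk
    obtain ⟨i, hi⟩ := Option.isSome_iff_exists.mp (hpre a (by simp))
    have hrest : ∀ x ∈ rest, (pyLookup x "id").isSome := fun x hx => hpre x (by simp [hx])
    rw [List.foldl_cons, List.filter_cons]
    by_cases hex : exclude.contains i = true
    · rw [stepA_excluded exclude d a i hi hex]
      rw [if_neg (by simp [hi, (by simpa using hex : i ∈ exclude)])]
      exact ih d hrest hk
    · have hexf : exclude.contains i = false := by simpa using hex
      rw [stepA_kept exclude d a i hi hexf hk]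
      rw [if_pos (by simp [hi, (by simpa using hexf : i ∉ exclude)]), List.map_cons, List.foldl_cons]
      exact ih _ hrest (contains_step d a hk)

def d0 : PySem.Dict String (List (List (String × String))) :=
  pvCatKeys.foldl (fun d k => d.insert k []) PySem.Dict.empty

lemma d0_eq : d0 = PySem.Dict.mk [("research", []), ("regulation", []), ("news", []),
    ("industry", []), ("diagnostics", [])] := by decide

lemma d0_contains (c : String) : d0.contains c = pvCatKeys.contains c := by
  rw [d0_eq]
  simp [PySem.Dict.contains_mk, pvCatKeys, BEq.comm, Bool.beq_eq_decide_eq]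

lemma d0_getD (c : String) : d0.getD c [] = [] := by
  rw [d0_eq]
  simp only [PySem.Dict.getD_eq_get?_getD, PySem.Dict.get?_mk_cons]
  split_ifs <;> rfl

lemma main_eq (articles : List (List (String × String))) (exclude_ids : Option (List String))
    (hpre : articles.all (fun a => a.any (fun kv => kv.1 == "id")) = true) :
    by_category articles exclude_ids = by_category_alt articles exclude_ids := by
  have hpre' : ∀ a ∈ articles, (pyLookup a "id").isSome := by
    intro a hal
    have := (List.all_eq_true.mp hpre) a hal
    simp only [List.any_eq_true] at this
    obtain ⟨kv, hkv, hk⟩ := this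
    simp only [pyLookup, Option.isSome_map]
    exact List.find?_isSome.mpr ⟨kv, hkv, hk⟩
  dsimp only [by_category, by_category_alt]
  rw [show (pvCatKeys.foldl (fun d k => d.insert k ([] : List (List (String × String)))) PySem.Dict.empty) = d0 from rfl]
  rw [foldA_eq (exclude_ids.getD []) articles d0 hpre' d0_contains]
  set L := (articles.filter (fun a => !((exclude_ids.getD []).contains ((pyLookup a "id").getD "")))).map
      (fun a => (resolveCat a, a)) with hL
  have hnodup : d0.keys.Nodup := by rw [d0_eq]; decide
  rw [PySem.Dict.items_eq_map_keys
      (L.foldl (fun d p => d.modify p.1 [] (fun l => l ++ [p.2])) d0)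
      (PySem.Dict.nodup_keys_foldl_modify_key L Prod.fst [] (fun _ p l => l ++ [p.2]) d0 hnodup) []]
  have hkeys : (L.foldl (fun d p => d.modify p.1 [] (fun l => l ++ [p.2])) d0).keys = pvCatKeys := by
    rw [PySem.Dict.keys_foldl_modify_key L Prod.fst [] (fun _ p l => l ++ [p.2]) d0]
    rw [PySem.Set.update_eq_append_filter]
    have hnil : (PySem.Set.ofList (L.map Prod.fst)).filter (fun y => !(PySem.Set.contains d0.keys y)) = [] := by
      rw [List.filter_eq_nil_iff]
      intro y hy
      have hy' := (PySem.Set.mem_ofList _ _).mp hy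
      simp only [hL, List.map_map, List.mem_map] at hy'
      obtain ⟨a, _, ha⟩ := hy'
      have hya : y = resolveCat a := by simpa using ha.symm
      subst hya
      have h1 : d0.keys = pvCatKeys := by rw [d0_eq]; decide
      simp [h1, (by simpa using resolveCat_mem a : resolveCat a ∈ pvCatKeys)]
    rw [hnil, List.append_nil]
    rw [d0_eq]; decide
  rw [hkeys]
  apply List.map_congr_left
  intro k _
  refine Prod.ext rfl ?_
  rw [PySem.Dict.getD_foldl_modify_append L d0 k, d0_getD, List.nil_append]
  rw [hL, List.filter_map]
  rw [show ((fun (p : String × List (String × String)) => p.1 == k) ∘ (fun a => (resolveCat a, a)))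
      = fun a => resolveCat a == k from rfl]
  rw [List.map_map]
  rw [show ((fun (x : String × List (String × String)) => x.2) ∘ fun a => (resolveCat a, a)) = id from rfl]
  rw [List.map_id, List.filter_filter]
  apply List.filter_congr
  intro a _
  rw [ofList_contains]
  exact Bool.and_comm _ _

-- ===== VERDICT (by name: the statement is the Claim_ definition above) =====
theorem by_category_spec : Claim_equal_by_category := by
  intro articles exclude_ids _ hpre
  unfold Spec_by_category
  exact main_eq articles exclude_ids hpre
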